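-- pv_equiv track=rewrite | github.com/shatianming5/open-problem-atlas | verifiers/checkers/math/overfull_checker.py | _can_edge_color
-- ===== SOURCE A (Python) =====
-- def _can_edge_color(edges: list, adj: list[set[int]], n: int, k: int) -> bool:
--     m = len(edges)
--     color = [-1] * m
--     # Build edge conflict: edges sharing a vertex
--     conflicts = [[] for _ in range(m)]
--     for i in range(m):
--         for j in range(i + 1, m):
--             u1, v1 = edges[i]
--             u2, v2 = edges[j]
--             if u1 == u2 or u1 == v2 or v1 == u2 or v1 == v2:
--                 conflicts[i].append(j)
--                 conflicts[j].append(i)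
--
--     def bt(idx: int) -> bool:
--         if idx == m:
--             return True
--         for c in range(k):
--             if all(color[nb] != c for nb in conflicts[idx] if color[nb] >= 0):
--                 color[idx] = c
--                 if bt(idx + 1):
--                     return True
--                 color[idx] = -1
--         return False
--
--     return bt(0)
-- ===== SOURCE B (Python) =====
-- def _can_edge_color(edges: list, adj: list, n: int, k: int) -> bool:
--     # Color-by-color search: for each color in turn, peel off one vertex-disjoint
--     # set of edges (a matching, chosen by backtracking) and recurse on the rest;
--     # the edge-by-edge assignment and the conflict graph of A disappear.
--     def rnd(c, remaining):
--         if not remaining: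
--             return True
--         if c >= k:
--             return False
--
--         def pick(todo, chosen, rest):
--             # try every matching among `todo` compatible with vertex set `chosen`;
--             # deferred edges accumulate in `rest` for the next color
--             while todo:
--                 (u, v), todo = todo[0], todo[1:]
--                 if u not in chosen and v not in chosen:
--                     if pick(todo, chosen | {u, v}, rest):
--                         return True
--                 rest = rest + [(u, v)]
--             return rnd(c + 1, rest)
--
--         return pick(list(remaining), set(), [])
--
--     return rnd(0, list(edges))
-- ===== Notes on version B (the rewrite author's own statement) =====
-- stated objective: alternative
-- what changed: Replaced A's edge-by-edge color assignment over a precomputed O(m^2) conflict graph by a color-by-color search that, for each color in turn, picks one vertex-disjoint edge set (a matching) by backtracking and recurses on the deferred edges; no conflict graph and no color array exist in B.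
import Mathlib
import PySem

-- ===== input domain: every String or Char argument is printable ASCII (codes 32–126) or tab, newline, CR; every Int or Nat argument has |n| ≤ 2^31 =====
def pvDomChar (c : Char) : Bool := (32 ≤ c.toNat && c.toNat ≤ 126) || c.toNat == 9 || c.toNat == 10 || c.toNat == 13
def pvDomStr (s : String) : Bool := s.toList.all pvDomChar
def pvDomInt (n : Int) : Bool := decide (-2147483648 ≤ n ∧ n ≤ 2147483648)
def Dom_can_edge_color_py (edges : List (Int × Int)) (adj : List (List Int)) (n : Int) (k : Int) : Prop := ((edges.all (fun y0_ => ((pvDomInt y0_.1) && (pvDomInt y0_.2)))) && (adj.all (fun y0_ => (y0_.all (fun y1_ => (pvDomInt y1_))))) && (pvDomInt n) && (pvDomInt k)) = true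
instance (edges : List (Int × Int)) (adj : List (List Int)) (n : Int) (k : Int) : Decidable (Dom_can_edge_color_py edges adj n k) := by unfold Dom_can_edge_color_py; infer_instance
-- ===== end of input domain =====

-- B replaces A's edge-by-edge backtracking over a precomputed conflict graph by a
-- color-by-color search that peels one vertex-disjoint edge set (matching) per color;
-- same return value (k-edge-colorability), a genuinely different search decomposition.

-- ===== PORT A =====
-- u1 == u2 or u1 == v2 or v1 == u2 or v1 == v2
def pvShareA (e1 e2 : Int × Int) : Bool :=
  e1.1 == e2.1 || e1.1 == e2.2 || e1.2 == e2.1 || e1.2 == e2.2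

-- the double loop building 'conflicts'; indices i, j are kept as Nat (Python only produces
-- indices in [0, m)); edges[i] via getElem?/getD is exact since i < m = edges.length here
def pvConflicts (edges : List (Int × Int)) (m : Nat) : List (List Nat) :=
  (List.range m).foldl (fun conf i =>
    (List.range' (i+1) (m - (i+1))).foldl (fun cf j =>
      if pvShareA (edges[i]?.getD (0,0)) (edges[j]?.getD (0,0)) then
        let cf' := cf.set i ((cf[i]?.getD []) ++ [j])
        cf'.set j ((cf'[j]?.getD []) ++ [i])
      else cf) conf) (List.replicate m [])

-- 'for c in range(k): if …: return True; … return False', written as a counting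
-- recursion so that (like Python's lazy range) it stops at the first success
def pvAnyColor (f : Int → Bool) : Nat → Int → Bool
  | 0, _ => false
  | n+1, c => if f c then true else pvAnyColor f n (c+1)

-- bt(idx); structural recursion on rem = m - idx ('idx == m' is 'rem == 0')
def pvBtA (conflicts : List (List Nat)) (k : Int) : Nat → Nat → List Int → Bool
  | 0, _idx, _color => true
  | rem+1, idx, color =>
    pvAnyColor (fun c =>
      ((conflicts[idx]?.getD []).all (fun nb =>
        !(decide (0 ≤ color[nb]?.getD (-1))) || (color[nb]?.getD (-1)) != c))
      && pvBtA conflicts k rem (idx+1) (color.set idx c)) k.toNat 0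

def can_edge_color_py (edges : List (Int × Int)) (adj : List (List Int)) (n : Int) (k : Int) : Bool :=
  pvBtA (pvConflicts edges edges.length) k edges.length 0 (List.replicate edges.length (-1))

-- ===== PORT B =====
-- pick(todo, chosen, rest) of Source B: the while-loop over 'todo' is the structural recursion;
-- at a takeable edge it branches (take || defer), otherwise it defers the edge into 'rest'
def pvPick (next : List (Int × Int) → Bool) : List (Int × Int) → PySem.Set Int → List (Int × Int) → Bool
  | [], _chosen, rest => next rest
  | (u, v) :: todo, chosen, rest =>
    if !PySem.Set.contains chosen u && !PySem.Set.contains chosen v then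
      pvPick next todo (PySem.Set.add (PySem.Set.add chosen u) v) rest
        || pvPick next todo chosen (rest ++ [(u, v)])
    else pvPick next todo chosen (rest ++ [(u, v)])

-- rnd(c, remaining) of Source B; kc is the count of colors still available (max(k - c, 0)),
-- so Python's 'c >= k' test is 'kc = 0'
def pvRound : Nat → List (Int × Int) → Bool
  | kc, remaining =>
    if remaining.isEmpty then true
    else
      match kc with
      | 0 => false
      | kc' + 1 => pvPick (fun rest => pvRound kc' rest) remaining PySem.Set.empty []

def can_edge_color_py_alt (edges : List (Int × Int)) (adj : List (List Int)) (n : Int) (k : Int) : Bool :=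
  pvRound k.toNat edges

-- ===== PRECONDITION & SPEC =====
def Spec_can_edge_color_py (edges : List (Int × Int)) (adj : List (List Int)) (n : Int) (k : Int) (out : Bool) : Prop := out = can_edge_color_py_alt edges adj n k
instance (edges : List (Int × Int)) (adj : List (List Int)) (n : Int) (k : Int) (out : Bool) : Decidable (Spec_can_edge_color_py edges adj n k out) := by unfold Spec_can_edge_color_py; infer_instance

-- ===== CLAIM (what is proved, stated in full; the proofs are below) =====
def Claim_equal_can_edge_color_py : Prop := ∀ (edges : List (Int × Int)) (adj : List (List Int)) (n : Int) (k : Int), Dom_can_edge_color_py edges adj n k → Spec_can_edge_color_py edges adj n k (can_edge_color_py edges adj n k)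

-- ===== LEMMAS AND PROOFS =====
-- Both programs are proved equal to 'pvCP k.toNat edges': "a proper k-edge-coloring exists".

def pvE (edges : List (Int × Int)) (i : Nat) : Int × Int := edges[i]?.getD (0,0)

def pvShareP (e1 e2 : Int × Int) : Prop :=
  e1.1 = e2.1 ∨ e1.1 = e2.2 ∨ e1.2 = e2.1 ∨ e1.2 = e2.2

-- a colored edge pair is proper: sharing a vertex forces distinct colors
def pvR (p q : (Int × Int) × Int) : Prop := pvShareP p.1 q.1 → p.2 ≠ q.2

-- "edges admit a proper coloring with kc colors"
def pvCP (kc : Nat) (es : List (Int × Int)) : Prop :=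
  ∃ cs : List Int, cs.length = es.length ∧ (∀ c ∈ cs, 0 ≤ c ∧ c < (kc : Int)) ∧
    List.Pairwise pvR (es.zip cs)

theorem pvShareA_eq_true_iff (e1 e2 : Int × Int) : pvShareA e1 e2 = true ↔ pvShareP e1 e2 := by
  simp [pvShareA, pvShareP]; tauto

theorem pvShareP_symm {e1 e2 : Int × Int} : pvShareP e1 e2 ↔ pvShareP e2 e1 := by
  unfold pvShareP; constructor <;> intro h <;> rcases h with h|h|h|h <;> simp [h]

-- ---- A-side: the conflict lists computed by the double loop ----

def pvConfInv (edges : List (Int × Int)) (m : Nat) (bnd : Nat → Nat → Prop) (cf : List (List Nat)) : Prop :=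
  cf.length = m ∧ ∀ a x : Nat, (x ∈ cf[a]?.getD []) ↔
    (a < m ∧ x < m ∧ a ≠ x ∧ pvShareP (pvE edges a) (pvE edges x) ∧ bnd a x)

theorem pvMem_setApp (cf : List (List Nat)) (i j : Nat) (hi : i < cf.length) (a x : Nat) :
    x ∈ (cf.set i ((cf[i]?.getD []) ++ [j]))[a]?.getD [] ↔
      (x ∈ cf[a]?.getD [] ∨ (a = i ∧ x = j)) := by
  rw [List.getElem?_set]
  by_cases h : i = a
  · subst h; simp [hi]
  · simp [h]; intro; omega

theorem pvInner_fold (edges : List (Int × Int)) (m i : Nat) (hi : i < m) :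
    ∀ (len s : Nat) (cf : List (List Nat)), i + 1 ≤ s → s + len ≤ m →
      pvConfInv edges m (fun a x => min a x < i ∨ (min a x = i ∧ max a x < s)) cf →
      pvConfInv edges m (fun a x => min a x < i ∨ (min a x = i ∧ max a x < s + len))
        ((List.range' s len).foldl (fun cf j =>
          if pvShareA (edges[i]?.getD (0,0)) (edges[j]?.getD (0,0)) then
            let cf' := cf.set i ((cf[i]?.getD []) ++ [j])
            cf'.set j ((cf'[j]?.getD []) ++ [i])
          else cf) cf) := by
  intro len
  induction len with
  | zero => intro s cf _ _ h; simpa using h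
  | succ len ih =>
    intro s cf hs hsm hinv
    rw [List.range'_succ, List.foldl_cons]
    have hsml : s < m := by omega
    have hstep : pvConfInv edges m
        (fun a x => min a x < i ∨ (min a x = i ∧ max a x < s + 1))
        (if pvShareA (edges[i]?.getD (0,0)) (edges[s]?.getD (0,0)) then
          let cf' := cf.set i ((cf[i]?.getD []) ++ [s])
          cf'.set s ((cf'[s]?.getD []) ++ [i])
        else cf) := by
      obtain ⟨hlen, hmem⟩ := hinv
      by_cases hsh : pvShareA (edges[i]?.getD (0,0)) (edges[s]?.getD (0,0)) = true
      · simp only [hsh, if_pos]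
        have hshp : pvShareP (pvE edges i) (pvE edges s) := by
          rw [← pvShareA_eq_true_iff]; unfold pvE; exact hsh
        constructor
        · simp [hlen]
        · intro a x
          rw [pvMem_setApp _ s i (by simp [hlen]; omega),
              pvMem_setApp _ i s (by omega), hmem]
          constructor
          · rintro ((h | ⟨rfl, rfl⟩) | ⟨rfl, rfl⟩)
            · exact ⟨h.1, h.2.1, h.2.2.1, h.2.2.2.1, by omega⟩
            · exact ⟨hi, hsml, by omega, hshp, by omega⟩
            · exact ⟨hsml, hi, by omega, pvShareP_symm.mp hshp, by omega⟩
          · rintro ⟨ha, hx, hne, hsp, hbnd⟩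
            rcases hbnd with h | ⟨hmin, hmax⟩
            · exact Or.inl (Or.inl ⟨ha, hx, hne, hsp, Or.inl h⟩)
            · by_cases hmax' : max a x < s
              · exact Or.inl (Or.inl ⟨ha, hx, hne, hsp, Or.inr ⟨hmin, hmax'⟩⟩)
              · have hmaxs : max a x = s := by omega
                by_cases hai : a = i
                · exact Or.inl (Or.inr ⟨hai, by omega⟩)
                · exact Or.inr ⟨by omega, by omega⟩
      · simp only [hsh, if_neg, Bool.not_eq_true]
        refine ⟨hlen, fun a x => ?_⟩
        rw [hmem]
        have hnsp : ¬ pvShareP (pvE edges i) (pvE edges s) := by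
          rw [← pvShareA_eq_true_iff]; unfold pvE; simp [hsh]
        constructor
        · rintro ⟨ha, hx, hne, hsp, hbnd⟩
          exact ⟨ha, hx, hne, hsp, by omega⟩
        · rintro ⟨ha, hx, hne, hsp, hbnd⟩
          refine ⟨ha, hx, hne, hsp, ?_⟩
          rcases hbnd with h | ⟨hmin, hmax⟩
          · exact Or.inl h
          · by_cases hmax' : max a x < s
            · exact Or.inr ⟨hmin, hmax'⟩
            · have hmaxs : max a x = s := by omega
              exfalso
              by_cases hai : a = i
              · have : x = s := by omega
                subst hai this; exact hnsp hsp
              · have hxi : x = i := by omega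
                have has : a = s := by omega
                subst hxi has; exact hnsp (pvShareP_symm.mp hsp)
    have := ih (s+1) _ (by omega) (by omega) (by
      have h' := hstep
      exact h')
    simpa [Nat.add_assoc, Nat.add_comm 1 len, Nat.add_left_comm] using this

theorem pvOuter_fold (edges : List (Int × Int)) (m : Nat) :
    ∀ (len t : Nat) (cf : List (List Nat)), t + len = m →
      pvConfInv edges m (fun a x => min a x < t) cf →
      pvConfInv edges m (fun a x => min a x < t + len)
        ((List.range' t len).foldl (fun conf i =>
          (List.range' (i+1) (m - (i+1))).foldl (fun cf j =>
            if pvShareA (edges[i]?.getD (0,0)) (edges[j]?.getD (0,0)) then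
              let cf' := cf.set i ((cf[i]?.getD []) ++ [j])
              cf'.set j ((cf'[j]?.getD []) ++ [i])
            else cf) conf) cf) := by
  intro len
  induction len with
  | zero => intro t cf _ h; simpa using h
  | succ len ih =>
    intro t cf htm hinv
    rw [List.range'_succ, List.foldl_cons]
    have htlt : t < m := by omega
    have hpre : pvConfInv edges m
        (fun a x => min a x < t ∨ (min a x = t ∧ max a x < t + 1)) cf := by
      obtain ⟨hlen, hmem⟩ := hinv
      refine ⟨hlen, fun a x => ?_⟩
      rw [hmem]
      constructor
      · rintro ⟨ha, hx, hne, hsp, hb⟩; exact ⟨ha, hx, hne, hsp, Or.inl hb⟩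
      · rintro ⟨ha, hx, hne, hsp, hb⟩
        refine ⟨ha, hx, hne, hsp, ?_⟩; omega
    have hin := pvInner_fold edges m t htlt (m - (t+1)) (t+1) cf (by omega) (by omega) hpre
    have hpost : pvConfInv edges m (fun a x => min a x < t + 1)
        ((List.range' (t+1) (m - (t+1))).foldl (fun cf j =>
          if pvShareA (edges[t]?.getD (0,0)) (edges[j]?.getD (0,0)) then
            let cf' := cf.set t ((cf[t]?.getD []) ++ [j])
            cf'.set j ((cf'[j]?.getD []) ++ [t])
          else cf) cf) := by
      obtain ⟨hlen, hmem⟩ := hin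
      refine ⟨hlen, fun a x => ?_⟩
      rw [hmem]
      constructor
      · rintro ⟨ha, hx, hne, hsp, hb⟩
        refine ⟨ha, hx, hne, hsp, ?_⟩; omega
      · rintro ⟨ha, hx, hne, hsp, hb⟩
        refine ⟨ha, hx, hne, hsp, ?_⟩; omega
    have := ih (t+1) _ (by omega) hpost
    simpa [Nat.add_assoc, Nat.add_comm 1 len, Nat.add_left_comm] using this

theorem pvConflicts_mem (edges : List (Int × Int)) (m : Nat) (a x : Nat) :
    x ∈ (pvConflicts edges m)[a]?.getD [] ↔
      (a < m ∧ x < m ∧ a ≠ x ∧ pvShareP (pvE edges a) (pvE edges x)) := by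
  have hbase : pvConfInv edges m (fun a x => min a x < 0) (List.replicate m []) := by
    refine ⟨List.length_replicate, fun a x => ?_⟩
    rw [List.getElem?_replicate]
    constructor
    · intro h; by_cases ham : a < m <;> simp [ham] at h
    · rintro ⟨_, _, _, _, hb⟩; omega
  have h := pvOuter_fold edges m m 0 (List.replicate m []) (by omega) hbase
  unfold pvConflicts
  rw [List.range_eq_range']
  obtain ⟨_, hmem⟩ := h
  rw [hmem]
  constructor
  · rintro ⟨ha, hx, hne, hsp, _⟩; exact ⟨ha, hx, hne, hsp⟩
  · rintro ⟨ha, hx, hne, hsp⟩; exact ⟨ha, hx, hne, hsp, by omega⟩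

theorem pvAnyColor_congr {f g : Int → Bool} :
    ∀ (n : Nat) (c0 : Int), (∀ c : Int, c0 ≤ c → f c = g c) →
      pvAnyColor f n c0 = pvAnyColor g n c0 := by
  intro n
  induction n with
  | zero => intro c0 _; rfl
  | succ n ih =>
    intro c0 h
    rw [pvAnyColor, pvAnyColor, h c0 le_rfl]
    by_cases hg : g c0 = true
    · simp [hg]
    · simp only [Bool.not_eq_true] at hg
      simp [hg]
      exact ih (c0+1) (fun c hc => h c (by omega))

theorem pvContains_false {α : Type} [BEq α] [LawfulBEq α] {s : PySem.Set α} {x : α} :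
    PySem.Set.contains s x = false ↔ x ∉ s := by
  rw [← PySem.Set.contains_iff]; cases PySem.Set.contains s x <;> simp

-- ghost intermediate used only in the proofs: A's search with the color array replaced
-- by the set of occupied (vertex, color) pairs; links A to the coloring characterization
def pvBtB (edges : List (Int × Int)) (k : Int) : Nat → Nat → PySem.Set (Int × Int) → Bool
  | 0, _idx, _used => true
  | rem+1, idx, used =>
    let e := edges[idx]?.getD (0,0)
    pvAnyColor (fun c =>
      !(PySem.Set.contains used (e.1, c)) && (!(PySem.Set.contains used (e.2, c)) &&
        pvBtB edges k rem (idx+1) (PySem.Set.add (PySem.Set.add used (e.1, c)) (e.2, c)))) k.toNat 0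

def pvInv (edges : List (Int × Int)) (idx : Nat) (color : List Int) (used : PySem.Set (Int × Int)) : Prop :=
  color.length = edges.length ∧
  (∀ j : Nat, idx ≤ j → color[j]?.getD (-1) = -1) ∧
  (∀ j : Nat, j < idx → 0 ≤ color[j]?.getD (-1)) ∧
  (∀ x c : Int, ((x, c) ∈ used) ↔ ∃ j : Nat, j < idx ∧
    ((pvE edges j).1 = x ∨ (pvE edges j).2 = x) ∧ color[j]?.getD (-1) = c)

theorem pvBt_eq (edges : List (Int × Int)) (k : Int) :
    ∀ (rem idx : Nat) (color : List Int) (used : PySem.Set (Int × Int)),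
      idx + rem = edges.length → pvInv edges idx color used →
      pvBtA (pvConflicts edges edges.length) k rem idx color = pvBtB edges k rem idx used := by
  intro rem
  induction rem with
  | zero => intro idx color used _ _; rfl
  | succ rem ih =>
    intro idx color used hidx hinv
    obtain ⟨hlen, hge, hlt, hused⟩ := hinv
    have hidxm : idx < edges.length := by omega
    rw [pvBtA, pvBtB]
    apply pvAnyColor_congr
    intro c hc
    have hcheck : ((pvConflicts edges edges.length)[idx]?.getD []).all (fun nb =>
          !(decide (0 ≤ color[nb]?.getD (-1))) || (color[nb]?.getD (-1)) != c)
        = (!(PySem.Set.contains used ((edges[idx]?.getD (0,0)).1, c)) &&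
           !(PySem.Set.contains used ((edges[idx]?.getD (0,0)).2, c))) := by
      rw [Bool.eq_iff_iff]
      simp only [List.all_eq_true, Bool.or_eq_true, Bool.not_eq_true',
        decide_eq_false_iff_not, bne_iff_ne, Bool.and_eq_true,
        pvContains_false]
      constructor
      · intro h
        constructor <;>
        · intro hmem
          rw [hused] at hmem
          obtain ⟨j, hj, htouch, hcol⟩ := hmem
          have hjin : j ∈ (pvConflicts edges edges.length)[idx]?.getD [] := by
            rw [pvConflicts_mem]
            refine ⟨hidxm, by omega, by omega, ?_⟩
            unfold pvShareP pvE at *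
            rcases htouch with h' | h' <;> simp [← h']
          rcases h j hjin with h' | h'
          · exact h' (hlt j hj)
          · exact h' hcol
      · rintro ⟨hu, hv⟩ nb hnb
        rw [pvConflicts_mem] at hnb
        obtain ⟨_, hnbm, hne, hsp⟩ := hnb
        by_cases hcol : 0 ≤ color[nb]?.getD (-1)
        · have hnblt : nb < idx := by
            by_contra hge'
            have := hge nb (by omega)
            omega
          right
          intro heq
          unfold pvShareP pvE at hsp
          rcases hsp with h' | h' | h' | h'
          · exact hu (by rw [hused]; exact ⟨nb, hnblt, Or.inl h'.symm, heq⟩)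
          · exact hu (by rw [hused]; exact ⟨nb, hnblt, Or.inr h'.symm, heq⟩)
          · exact hv (by rw [hused]; exact ⟨nb, hnblt, Or.inl h'.symm, heq⟩)
          · exact hv (by rw [hused]; exact ⟨nb, hnblt, Or.inr h'.symm, heq⟩)
        · exact Or.inl hcol
    rw [hcheck]
    cases hu : PySem.Set.contains used ((edges[idx]?.getD (0, 0)).1, c) <;>
      cases hv : PySem.Set.contains used ((edges[idx]?.getD (0, 0)).2, c) <;>
        simp only [Bool.not_true, Bool.not_false, Bool.false_and, Bool.and_false,
          Bool.true_and, Bool.and_true]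
    apply ih (idx+1) _ _ (by omega)
    refine ⟨by simp [hlen], ?_, ?_, ?_⟩
    · intro j hj
      rw [List.getElem?_set]
      have : ¬ idx = j := by omega
      simp only [this, if_false]
      exact hge j (by omega)
    · intro j hj
      rw [List.getElem?_set]
      by_cases hji : idx = j
      · subst hji
        have hic : idx < color.length := by omega
        simp [hic]
        omega
      · simp only [hji, if_false]
        exact hlt j (by omega)
    · intro x c'
      rw [PySem.Set.mem_add, PySem.Set.mem_add, hused]
      constructor
      · rintro ((⟨j, hj, htouch, hcol⟩ | heq) | heq)
        · refine ⟨j, by omega, htouch, ?_⟩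
          rw [List.getElem?_set]
          have : ¬ idx = j := by omega
          simp only [this, if_false]; exact hcol
        · refine ⟨idx, by omega, Or.inl (by injection heq with h1 h2; exact h1.symm), ?_⟩
          rw [List.getElem?_set]
          simp [hlen, hidxm]
          injection heq with h1 h2; exact h2.symm
        · refine ⟨idx, by omega, Or.inr (by injection heq with h1 h2; exact h1.symm), ?_⟩
          rw [List.getElem?_set]
          simp [hlen, hidxm]
          injection heq with h1 h2; exact h2.symm
      · rintro ⟨j, hj, htouch, hcol⟩
        rw [List.getElem?_set] at hcol
        by_cases hji : idx = j
        · subst hji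
          have hic : idx < color.length := by omega
          simp [hic] at hcol
          subst hcol
          unfold pvE at htouch
          rcases htouch with h' | h'
          · exact Or.inl (Or.inr (by rw [h']))
          · exact Or.inr (by rw [h'])
        · simp only [hji, if_false] at hcol
          exact Or.inl (Or.inl ⟨j, by omega, htouch, hcol⟩)

-- ---- characterization of the ghost search ----

theorem pvAnyColor_iff (f : Int → Bool) :
    ∀ (n : Nat) (c0 : Int),
      pvAnyColor f n c0 = true ↔ ∃ c : Int, c0 ≤ c ∧ c < c0 + (n : Int) ∧ f c = true := by
  intro n
  induction n with
  | zero =>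
    intro c0
    constructor
    · intro h; exact absurd h (by simp [pvAnyColor])
    · rintro ⟨c, h1, h2, _⟩; exfalso; omega
  | succ n ih =>
    intro c0
    rw [pvAnyColor]
    by_cases h0 : f c0 = true
    · rw [if_pos h0]
      constructor
      · intro _; exact ⟨c0, le_rfl, by push_cast; omega, h0⟩
      · intro _; rfl
    · have h0' : f c0 = false := by simpa using h0
      rw [if_neg h0, ih]
      constructor
      · rintro ⟨c, h1, h2, hf⟩; exact ⟨c, by omega, by push_cast at h2 ⊢; omega, hf⟩
      · rintro ⟨c, h1, h2, hf⟩
        refine ⟨c, ?_, by push_cast at h2 ⊢; omega, hf⟩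
        by_cases hcc : c = c0
        · subst hcc; rw [h0'] at hf; exact absurd hf (by simp)
        · omega

-- the four pair-disequalities produced by the (vertex, color) set equal "proper wrt this edge"
theorem pvNe_iff (u v a b c d : Int) :
    (((a, d) : Int × Int) ≠ (u, c) ∧ ((a, d) : Int × Int) ≠ (v, c) ∧
     ((b, d) : Int × Int) ≠ (u, c) ∧ ((b, d) : Int × Int) ≠ (v, c)) ↔
      (pvShareP (u, v) (a, b) → c ≠ d) := by
  simp [pvShareP, Prod.ext_iff]
  omega

theorem pvFresh_add_iff (e0 : Int × Int) (c : Int) (used : PySem.Set (Int × Int))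
    (q : (Int × Int) × Int) :
    ((¬ ((q.1.1, q.2) ∈ PySem.Set.add (PySem.Set.add used (e0.1, c)) (e0.2, c))) ∧
     (¬ ((q.1.2, q.2) ∈ PySem.Set.add (PySem.Set.add used (e0.1, c)) (e0.2, c)))) ↔
      ((¬ ((q.1.1, q.2) ∈ used)) ∧ (¬ ((q.1.2, q.2) ∈ used)) ∧ pvR (e0, c) q) := by
  obtain ⟨u, v⟩ := e0
  obtain ⟨⟨a, b⟩, d⟩ := q
  have hne := pvNe_iff u v a b c d
  simp only [PySem.Set.mem_add, not_or, pvR]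
  constructor
  · rintro ⟨⟨⟨h1, h2⟩, h3⟩, ⟨⟨h4, h5⟩, h6⟩⟩
    exact ⟨h1, h4, hne.mp ⟨h2, h3, h5, h6⟩⟩
  · rintro ⟨h1, h4, hr⟩
    obtain ⟨h2, h3, h5, h6⟩ := hne.mpr hr
    exact ⟨⟨⟨h1, h2⟩, h3⟩, ⟨⟨h4, h5⟩, h6⟩⟩

theorem pvBtB_iff (edges : List (Int × Int)) (k : Int) :
    ∀ (rem idx : Nat) (used : PySem.Set (Int × Int)), idx + rem = edges.length →
      (pvBtB edges k rem idx used = true ↔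
        ∃ cs : List Int, cs.length = rem ∧ (∀ c ∈ cs, 0 ≤ c ∧ c < ((k.toNat : Nat) : Int)) ∧
          List.Pairwise pvR ((edges.drop idx).zip cs) ∧
          ∀ p ∈ (edges.drop idx).zip cs, (¬ ((p.1.1, p.2) ∈ used)) ∧ (¬ ((p.1.2, p.2) ∈ used))) := by
  intro rem
  induction rem with
  | zero =>
    intro idx used h
    have hidx : idx = edges.length := by omega
    subst hidx
    rw [List.drop_length]
    constructor
    · intro _; exact ⟨[], rfl, by simp, by simp, by simp⟩
    · intro _; rfl
  | succ rem ih =>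
    intro idx used h
    have hidx : idx < edges.length := by omega
    have hdrop : edges.drop idx = edges[idx] :: edges.drop (idx + 1) :=
      List.drop_eq_getElem_cons hidx
    have hget : edges[idx]?.getD (0,0) = edges[idx] := by
      rw [List.getElem?_eq_getElem hidx]; rfl
    rw [pvBtB]
    simp only [hget]
    rw [pvAnyColor_iff]
    rw [hdrop]
    constructor
    · rintro ⟨c, hc0, hck, hf⟩
      simp only [Bool.and_eq_true, Bool.not_eq_true', pvContains_false] at hf
      obtain ⟨hu, hv, hbt⟩ := hf
      obtain ⟨cs', hlen, hrange, hpw, hfresh⟩ := (ih (idx+1) _ (by omega)).mp hbt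
      refine ⟨c :: cs', by simp [hlen], ?_, ?_, ?_⟩
      · intro x hx
        rcases List.mem_cons.mp hx with rfl | hx
        · exact ⟨hc0, by omega⟩
        · exact hrange x hx
      · rw [List.zip_cons_cons]
        refine List.pairwise_cons.mpr ⟨?_, hpw⟩
        intro q hq
        exact ((pvFresh_add_iff edges[idx] c used q).mp (hfresh q hq)).2.2
      · rw [List.zip_cons_cons]
        intro p hp
        rcases List.mem_cons.mp hp with rfl | hp
        · exact ⟨hu, hv⟩
        · have := (pvFresh_add_iff edges[idx] c used p).mp (hfresh p hp)
          exact ⟨this.1, this.2.1⟩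
    · rintro ⟨cs, hlen, hrange, hpw, hfresh⟩
      rcases cs with _ | ⟨c, cs'⟩
      · simp at hlen
      have hlen' : cs'.length = rem := by simpa using hlen
      rw [List.zip_cons_cons] at hpw hfresh
      have hpwc := List.pairwise_cons.mp hpw
      have hhead := hfresh (edges[idx], c) (List.mem_cons_self ..)
      have hcr := hrange c (List.mem_cons_self ..)
      refine ⟨c, hcr.1, by have := hcr.2; omega, ?_⟩
      simp only [Bool.and_eq_true, Bool.not_eq_true', pvContains_false]
      refine ⟨hhead.1, hhead.2, ?_⟩
      apply (ih (idx+1) _ (by omega)).mpr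
      refine ⟨cs', hlen', fun x hx => hrange x (List.mem_cons_of_mem _ hx), hpwc.2, ?_⟩
      intro p hp
      exact (pvFresh_add_iff edges[idx] c used p).mpr
        ⟨(hfresh p (List.mem_cons_of_mem _ hp)).1,
         (hfresh p (List.mem_cons_of_mem _ hp)).2, hpwc.1 p hp⟩

theorem pvA_iff (edges : List (Int × Int)) (adj : List (List Int)) (n : Int) (k : Int) :
    can_edge_color_py edges adj n k = true ↔ pvCP k.toNat edges := by
  have hAB : can_edge_color_py edges adj n k
      = pvBtB edges k edges.length 0 (PySem.Set.empty : PySem.Set (Int × Int)) := by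
    unfold can_edge_color_py
    apply pvBt_eq edges k edges.length 0 _ _ (by omega)
    refine ⟨List.length_replicate, ?_, ?_, ?_⟩
    · intro j _
      rw [List.getElem?_replicate]
      by_cases h : j < edges.length <;> simp [h]
    · intro j hj; omega
    · intro x c
      constructor
      · intro h; exact absurd h (List.not_mem_nil)
      · rintro ⟨j, hj, _⟩; omega
  rw [hAB, pvBtB_iff edges k edges.length 0 _ (by omega)]
  unfold pvCP
  simp [PySem.Set.empty]

-- ---- B-side: selection of a subsequence (the matching picked for one color) ----

inductive pvSel : List (Int × Int) → List (Int × Int) → List (Int × Int) → Prop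
  | nil : pvSel [] [] []
  | take {e l S T} : pvSel l S T → pvSel (e :: l) (e :: S) T
  | skip {e l S T} : pvSel l S T → pvSel (e :: l) S (e :: T)

theorem pvSel_nil {S T : List (Int × Int)} (h : pvSel [] S T) : S = [] ∧ T = [] := by
  cases h; exact ⟨rfl, rfl⟩

theorem pvChosen_step (u v : Int) (chosen : PySem.Set Int) (s : Int × Int) :
    ((¬ (s.1 ∈ PySem.Set.add (PySem.Set.add chosen u) v)) ∧
     (¬ (s.2 ∈ PySem.Set.add (PySem.Set.add chosen u) v))) ↔
      ((¬ (s.1 ∈ chosen)) ∧ (¬ (s.2 ∈ chosen)) ∧ ¬ pvShareP (u, v) s) := by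
  obtain ⟨a, b⟩ := s
  simp only [PySem.Set.mem_add, not_or, pvShareP]
  constructor
  · rintro ⟨⟨⟨h1, h2⟩, h3⟩, ⟨⟨h4, h5⟩, h6⟩⟩
    exact ⟨h1, h4, fun h => h2 h.symm, fun h => h5 h.symm, fun h => h3 h.symm, fun h => h6 h.symm⟩
  · rintro ⟨h1, h4, hn1, hn2, hn3, hn4⟩
    exact ⟨⟨⟨h1, fun h => hn1 h.symm⟩, fun h => hn3 h.symm⟩,
           ⟨⟨h4, fun h => hn2 h.symm⟩, fun h => hn4 h.symm⟩⟩

theorem pvPick_iff (next : List (Int × Int) → Bool) :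
    ∀ (todo : List (Int × Int)) (chosen : PySem.Set Int) (rest : List (Int × Int)),
      pvPick next todo chosen rest = true ↔
        ∃ S T, pvSel todo S T ∧ S.Pairwise (fun a b => ¬ pvShareP a b) ∧
          (∀ e ∈ S, (¬ (e.1 ∈ chosen)) ∧ (¬ (e.2 ∈ chosen))) ∧ next (rest ++ T) = true := by
  intro todo
  induction todo with
  | nil =>
    intro chosen rest
    constructor
    · intro hn
      exact ⟨[], [], pvSel.nil, by simp, by simp, by simpa using hn⟩
    · rintro ⟨S, T, hsel, _, _, hnext⟩
      obtain ⟨rfl, rfl⟩ := pvSel_nil hsel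
      simpa using hnext
  | cons e todo ih =>
    obtain ⟨u, v⟩ := e
    intro chosen rest
    by_cases hb : (!PySem.Set.contains chosen u && !PySem.Set.contains chosen v) = true
    · have hfree : (¬ (u ∈ chosen)) ∧ (¬ (v ∈ chosen)) := by
        simp only [Bool.and_eq_true, Bool.not_eq_true', pvContains_false] at hb
        exact hb
      rw [pvPick]
      simp only [hb, if_true, Bool.or_eq_true]
      constructor
      · rintro (htake | hdefer)
        · obtain ⟨S', T', hsel, hpw, hch, hnext⟩ := (ih _ _).mp htake
          refine ⟨(u, v) :: S', T', pvSel.take hsel, ?_, ?_, hnext⟩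
          · refine List.pairwise_cons.mpr ⟨?_, hpw⟩
            intro s hs
            exact ((pvChosen_step u v chosen s).mp (hch s hs)).2.2
          · intro s hs
            rcases List.mem_cons.mp hs with rfl | hs
            · exact hfree
            · have := (pvChosen_step u v chosen s).mp (hch s hs)
              exact ⟨this.1, this.2.1⟩
        · obtain ⟨S', T', hsel, hpw, hch, hnext⟩ := (ih _ _).mp hdefer
          exact ⟨S', (u, v) :: T', pvSel.skip hsel, hpw, hch, by simpa using hnext⟩
      · rintro ⟨S, T, hsel, hpw, hch, hnext⟩
        cases hsel with
        | take hsel' =>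
          left
          apply (ih _ _).mpr
          have hpwc := List.pairwise_cons.mp hpw
          refine ⟨_, _, hsel', hpwc.2, ?_, hnext⟩
          intro s hs
          exact (pvChosen_step u v chosen s).mpr
            ⟨(hch s (List.mem_cons_of_mem _ hs)).1,
             (hch s (List.mem_cons_of_mem _ hs)).2, hpwc.1 s hs⟩
        | skip hsel' =>
          right
          apply (ih _ _).mpr
          refine ⟨_, _, hsel', hpw, hch, ?_⟩
          simpa using hnext
    · have hnfree : (u ∈ chosen) ∨ (v ∈ chosen) := by
        by_contra hc
        push_neg at hc
        exact hb (by simp only [Bool.and_eq_true, Bool.not_eq_true', pvContains_false]; exact hc)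
      have hb' : (!PySem.Set.contains chosen u && !PySem.Set.contains chosen v) = false := by
        simpa using hb
      rw [pvPick]
      simp only [hb', Bool.false_eq_true, if_false]
      rw [ih]
      constructor
      · rintro ⟨S', T', hsel, hpw, hch, hnext⟩
        exact ⟨S', (u, v) :: T', pvSel.skip hsel, hpw, hch, by simpa using hnext⟩
      · rintro ⟨S, T, hsel, hpw, hch, hnext⟩
        cases hsel with
        | take hsel' =>
          exfalso
          have := hch (u, v) (List.mem_cons_self ..)
          rcases hnfree with h | h
          · exact this.1 h
          · exact this.2 h
        | skip hsel' =>
          refine ⟨_, _, hsel', hpw, hch, ?_⟩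
          simpa using hnext

-- merging: a matching S for the new color plus a kc-coloring of T gives a (kc+1)-coloring
theorem pvMerge (kc : Nat) {es S T : List (Int × Int)} (hsel : pvSel es S T) :
    ∀ (csT : List Int), csT.length = T.length →
      S.Pairwise (fun a b => ¬ pvShareP a b) →
      (∀ c ∈ csT, 0 ≤ c ∧ c < (kc : Int)) →
      List.Pairwise pvR (T.zip csT) →
      ∃ cs : List Int, cs.length = es.length ∧ (∀ c ∈ cs, 0 ≤ c ∧ c < (kc : Int) + 1) ∧
        List.Pairwise pvR (es.zip cs) ∧
        ∀ p ∈ es.zip cs, (p.2 = 0 ∧ p.1 ∈ S) ∨ ∃ q ∈ T.zip csT, p = (q.1, q.2 + 1) := by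
  induction hsel with
  | nil =>
    intro csT _ _ _ _
    exact ⟨[], rfl, by simp, by simp, by simp⟩
  | @take e l S' T' hsel' ih =>
    intro csT hlen hpwS hrange hpw
    have hpwSc := List.pairwise_cons.mp hpwS
    obtain ⟨cs, h1, h2, h3, h4⟩ := ih csT hlen hpwSc.2 hrange hpw
    refine ⟨0 :: cs, by simp [h1], ?_, ?_, ?_⟩
    · intro c hc
      rcases List.mem_cons.mp hc with rfl | hc
      · constructor
        · exact le_rfl
        · have : (0:Int) ≤ (kc : Int) := Int.natCast_nonneg kc
          omega
      · exact h2 c hc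
    · rw [List.zip_cons_cons]
      refine List.pairwise_cons.mpr ⟨?_, h3⟩
      intro q hq
      rcases h4 q hq with ⟨hq0, hqS⟩ | ⟨r, hr, rfl⟩
      · intro hsh; exact absurd hsh (hpwSc.1 q.1 hqS)
      · intro _
        have hr2 : r.2 ∈ csT := (List.of_mem_zip hr).2
        have := (hrange r.2 hr2).1
        omega
    · rw [List.zip_cons_cons]
      intro p hp
      rcases List.mem_cons.mp hp with rfl | hp
      · exact Or.inl ⟨rfl, List.mem_cons_self ..⟩
      · rcases h4 p hp with ⟨h0, hS⟩ | h
        · exact Or.inl ⟨h0, List.mem_cons_of_mem _ hS⟩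
        · exact Or.inr h
  | @skip e l S' T' hsel' ih =>
    intro csT hlen hpwS hrange hpw
    rcases csT with _ | ⟨c, csT'⟩
    · simp at hlen
    have hlen' : csT'.length = T'.length := by simpa using hlen
    have hrange' : ∀ x ∈ csT', 0 ≤ x ∧ x < (kc : Int) :=
      fun x hx => hrange x (List.mem_cons_of_mem _ hx)
    rw [List.zip_cons_cons] at hpw
    have hpwc := List.pairwise_cons.mp hpw
    obtain ⟨cs, h1, h2, h3, h4⟩ := ih csT' hlen' hpwS hrange' hpwc.2
    have hc := hrange c (List.mem_cons_self ..)
    refine ⟨(c + 1) :: cs, by simp [h1], ?_, ?_, ?_⟩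
    · intro x hx
      rcases List.mem_cons.mp hx with rfl | hx
      · constructor <;> omega
      · exact h2 x hx
    · rw [List.zip_cons_cons]
      refine List.pairwise_cons.mpr ⟨?_, h3⟩
      intro q hq
      rcases h4 q hq with ⟨h0, _⟩ | ⟨r, hr, rfl⟩
      · intro _; rw [h0]; omega
      · intro hsh
        have := hpwc.1 r hr hsh
        omega
    · rw [List.zip_cons_cons, List.zip_cons_cons]
      intro p hp
      rcases List.mem_cons.mp hp with rfl | hp
      · exact Or.inr ⟨(e, c), List.mem_cons_self .., rfl⟩
      · rcases h4 p hp with hl | ⟨r, hr, rfl⟩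
        · exact Or.inl hl
        · exact Or.inr ⟨r, List.mem_cons_of_mem _ hr, rfl⟩

-- splitting: a (kc+1)-coloring yields a matching (the color-0 class) plus a kc-coloring of the rest
theorem pvSplit (kc : Nat) :
    ∀ (es : List (Int × Int)) (cs : List Int), cs.length = es.length →
      (∀ c ∈ cs, 0 ≤ c ∧ c < (kc : Int) + 1) → List.Pairwise pvR (es.zip cs) →
      ∃ S T csT, pvSel es S T ∧ S.Pairwise (fun a b => ¬ pvShareP a b) ∧
        csT.length = T.length ∧ (∀ c ∈ csT, 0 ≤ c ∧ c < (kc : Int)) ∧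
        List.Pairwise pvR (T.zip csT) ∧
        (∀ s ∈ S, ((s, (0:Int)) ∈ es.zip cs)) ∧
        (∀ q ∈ T.zip csT, ((q.1, q.2 + 1) ∈ es.zip cs)) := by
  intro es
  induction es with
  | nil =>
    intro cs hlen _ _
    exact ⟨[], [], [], pvSel.nil, by simp, rfl, by simp, by simp, by simp, by simp⟩
  | cons e l ih =>
    intro cs hlen hrange hpw
    rcases cs with _ | ⟨c, cs'⟩
    · simp at hlen
    have hlen' : cs'.length = l.length := by simpa using hlen
    rw [List.zip_cons_cons] at hpw
    have hpwc := List.pairwise_cons.mp hpw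
    obtain ⟨S, T, csT, hsel, hpwS, hl, hr, hp, hmS, hmT⟩ :=
      ih cs' hlen' (fun x hx => hrange x (List.mem_cons_of_mem _ hx)) hpwc.2
    by_cases hc : c = 0
    · subst hc
      refine ⟨e :: S, T, csT, pvSel.take hsel, ?_, hl, hr, hp, ?_, ?_⟩
      · refine List.pairwise_cons.mpr ⟨?_, hpwS⟩
        intro s hs hsh
        exact (hpwc.1 (s, 0) (hmS s hs) hsh) rfl
      · intro s hs
        rcases List.mem_cons.mp hs with rfl | hs
        · rw [List.zip_cons_cons]; exact List.mem_cons_self ..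
        · rw [List.zip_cons_cons]; exact List.mem_cons_of_mem _ (hmS s hs)
      · intro q hq
        rw [List.zip_cons_cons]
        exact List.mem_cons_of_mem _ (hmT q hq)
    · have hcr := hrange c (List.mem_cons_self ..)
      have hc1 : 1 ≤ c := by omega
      refine ⟨S, e :: T, (c - 1) :: csT, pvSel.skip hsel, hpwS, by simp [hl], ?_, ?_, ?_, ?_⟩
      · intro x hx
        rcases List.mem_cons.mp hx with rfl | hx
        · constructor <;> omega
        · exact hr x hx
      · rw [List.zip_cons_cons]
        refine List.pairwise_cons.mpr ⟨?_, hp⟩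
        intro q hq hsh
        have h2 := hpwc.1 (q.1, q.2 + 1) (hmT q hq) hsh
        omega
      · intro s hs
        rw [List.zip_cons_cons]
        exact List.mem_cons_of_mem _ (hmS s hs)
      · rw [List.zip_cons_cons]
        intro q hq
        rcases List.mem_cons.mp hq with rfl | hq
        · rw [List.zip_cons_cons]
          have hcc : c - 1 + 1 = c := by omega
          simp only [hcc]
          exact List.mem_cons_self ..
        · rw [List.zip_cons_cons]
          exact List.mem_cons_of_mem _ (hmT q hq)

theorem pvRound_iff : ∀ (kc : Nat) (es : List (Int × Int)), pvRound kc es = true ↔ pvCP kc es := by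
  intro kc
  induction kc with
  | zero =>
    intro es
    cases es with
    | nil =>
      constructor
      · intro _; exact ⟨[], rfl, by simp, by simp⟩
      · intro _; rfl
    | cons e l =>
      constructor
      · intro h; exact absurd h (by simp [pvRound])
      · rintro ⟨cs, hlen, hrange, _⟩
        rcases cs with _ | ⟨c, cs'⟩
        · simp at hlen
        · have := hrange c (List.mem_cons_self ..)
          exfalso; omega
  | succ kc ih =>
    intro es
    cases es with
    | nil =>
      constructor
      · intro _; exact ⟨[], rfl, by simp, by simp⟩
      · intro _; rfl
    | cons e l =>
      have heq : pvRound (kc+1) (e :: l)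
          = pvPick (fun rest => pvRound kc rest) (e :: l) (PySem.Set.empty : PySem.Set Int) [] := by
        rw [pvRound]; rfl
      rw [heq, pvPick_iff]
      constructor
      · rintro ⟨S, T, hsel, hpwS, _, hnext⟩
        have hT : pvCP kc T := (ih T).mp (by simpa using hnext)
        obtain ⟨csT, hl, hr, hp⟩ := hT
        obtain ⟨cs, h1, h2, h3, _⟩ := pvMerge kc hsel csT hl hpwS hr hp
        refine ⟨cs, h1, ?_, h3⟩
        intro c hc
        have := h2 c hc
        push_cast
        omega
      · rintro ⟨cs, hlen, hrange, hpw⟩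
        obtain ⟨S, T, csT, hsel, hpwS, hl, hr, hp, _, _⟩ :=
          pvSplit kc (e :: l) cs hlen (by intro c hc; have := hrange c hc; push_cast at this ⊢; omega) hpw
        refine ⟨S, T, hsel, hpwS, ?_, ?_⟩
        · intro x _; simp [PySem.Set.empty]
        · simpa using (ih T).mpr ⟨csT, hl, hr, hp⟩

-- ===== VERDICT (by name: the statement is the Claim_ definition above) =====
theorem can_edge_color_py_spec : Claim_equal_can_edge_color_py := by
  intro edges adj n k _
  unfold Spec_can_edge_color_py
  have h1 := pvA_iff edges adj n k
  have h2 : can_edge_color_py_alt edges adj n k = true ↔ pvCP k.toNat edges := by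
    unfold can_edge_color_py_alt
    exact pvRound_iff k.toNat edges
  cases hA : can_edge_color_py edges adj n k <;>
    cases hB : can_edge_color_py_alt edges adj n k <;> simp_all
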